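-- pv_equiv track=rewrite | github.com/ChanYoung-dev/python | HelloWorld/2. CodingTEST/Level 1/[1차]비밀지도.py | solutionA
-- ===== SOURCE A (Python) =====
-- def solutionA(n, arr1, arr2):
--     answer = []
--     for num1, num2 in zip(arr1, arr2):
--         a, b = bin(num1)[2:], bin(num2)[2:]
--         while len(a) != n:
--             a = '0' + a
--         while len(b) != n:
--             b = '0' + b
--         answer.append(''.join(['#' if (int(a[i]) or int(b[i])) else ' ' for i in range(n)]))
--     return answer
-- ===== SOURCE B (Python) =====
-- def solutionA(n, arr1, arr2):
--     # OR the numbers and read bits most-significant first; no string padding needed.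
--     return [''.join('#' if (x | y) >> (n - 1 - i) & 1 else ' ' for i in range(n))
--             for x, y in zip(arr1, arr2)]
-- ===== Notes on version B (the rewrite author's own statement) =====
-- stated objective: idiomatic
-- what changed: B replaces A's binary-string construction, two while-loop zero-paddings and per-index int(a[i]) or int(b[i]) comparison by a single integer OR per pair and direct bit extraction ((x|y) >> (n-1-i) & 1) in one comprehension.
-- outside the precondition, e.g. on solutionA(3, [8, 1], [0, 2]): A does not finish within the time limit, B returns ['   ', ' ##']; on solutionA(2, [-1], [0]): A raises ValueError, B returns ['##']
import Mathlib
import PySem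

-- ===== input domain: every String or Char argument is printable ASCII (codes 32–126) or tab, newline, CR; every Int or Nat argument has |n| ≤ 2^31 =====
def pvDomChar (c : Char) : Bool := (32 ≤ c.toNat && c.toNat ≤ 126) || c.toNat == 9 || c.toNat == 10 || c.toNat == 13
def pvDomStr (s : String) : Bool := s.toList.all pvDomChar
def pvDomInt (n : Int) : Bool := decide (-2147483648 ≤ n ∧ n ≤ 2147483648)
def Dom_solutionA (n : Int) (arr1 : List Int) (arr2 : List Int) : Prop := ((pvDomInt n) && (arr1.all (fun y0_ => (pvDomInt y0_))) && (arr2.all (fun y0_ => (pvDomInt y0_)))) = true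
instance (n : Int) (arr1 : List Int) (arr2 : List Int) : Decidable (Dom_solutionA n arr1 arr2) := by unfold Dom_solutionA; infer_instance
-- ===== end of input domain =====

-- B replaces A's bin-string building, two while-loop zero-paddings and per-index
-- int(a[i]) or int(b[i]) test by one integer OR per pair plus direct bit extraction
-- (objective: idiomatic; same asymptotic cost).

-- ===== PORT A =====
-- bin(m)[2:] for m ≥ 1 (Pre_ keeps every number nonnegative, where this is exact).
def binNat : Nat → List Char
  | 0 => []
  | m+1 => binNat ((m+1)/2) ++ [if (m+1) % 2 = 1 then '1' else '0']
decreasing_by exact Nat.div_lt_self (Nat.succ_pos m) one_lt_two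

-- bin(m)[2:] including m = 0 (bin(0)[2:] = '0').
def binChars (m : Nat) : List Char := if m = 0 then ['0'] else binNat m

-- while len(a) != n: a = '0' + a  — fuel bounds the loop; fuel = n is enough on every
-- input where the Python loop terminates (those admitted by Pre_).
def padA (k : Nat) : Nat → List Char → List Char
  | 0, a => a
  | f+1, a => if a.length = k then a else padA k f ('0' :: a)

-- range(n) is ported as List.range n.toNat (exact for n ≥ 0; for n < 0 Pre_ forces the
-- zip empty, so the row builder never runs).  int(a[i]) or int(b[i]) on the '0'/'1'
-- characters produced above is exactly (a[i] = '1' ∨ b[i] = '1').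
def solutionA (n : Int) (arr1 : List Int) (arr2 : List Int) : List String :=
  (arr1.zip arr2).foldl (fun answer p =>
    let a := padA n.toNat n.toNat (binChars p.1.toNat)
    let b := padA n.toNat n.toNat (binChars p.2.toNat)
    answer ++ [String.mk ((List.range n.toNat).map (fun i =>
      if a.getD i '0' = '1' ∨ b.getD i '0' = '1' then '#' else ' '))]) []

-- ===== PORT B =====
-- (x | y) >> (n - 1 - i) & 1 is Nat.testBit of the OR (numbers nonnegative under Pre_).
def solutionA_alt (n : Int) (arr1 : List Int) (arr2 : List Int) : List String :=
  (arr1.zip arr2).map (fun p =>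
    String.mk ((List.range n.toNat).map (fun i =>
      if (p.1.toNat ||| p.2.toNat).testBit (n.toNat - 1 - i) then '#' else ' ')))

-- ===== PRECONDITION & SPEC =====
-- Pre_ is exactly where the Python A returns: every zipped number must be ≥ 0 (bin(-m)
-- gives 'b…' → int('b') raises ValueError) and fit in n bits, and n ≥ 1 unless the zip
-- is empty (otherwise a while-loop never terminates).
def Pre_solutionA (n : Int) (arr1 : List Int) (arr2 : List Int) : Prop :=
  (arr1.zip arr2 = [] ∨ 1 ≤ n) ∧
  ∀ p ∈ arr1.zip arr2, 0 ≤ p.1 ∧ p.1 < 2 ^ n.toNat ∧ 0 ≤ p.2 ∧ p.2 < 2 ^ n.toNat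
instance (n : Int) (arr1 : List Int) (arr2 : List Int) : Decidable (Pre_solutionA n arr1 arr2) := by unfold Pre_solutionA; infer_instance

def pvWitness_solutionA : Int × List Int × List Int := (2, [1, 2], [2, 1])

def Spec_solutionA (n : Int) (arr1 : List Int) (arr2 : List Int) (out : List String) : Prop := out = solutionA_alt n arr1 arr2
instance (n : Int) (arr1 : List Int) (arr2 : List Int) (out : List String) : Decidable (Spec_solutionA n arr1 arr2 out) := by unfold Spec_solutionA; infer_instance

-- ===== CLAIM (what is proved, stated in full; the proofs are below) =====
def Claim_equal_solutionA : Prop := ∀ (n : Int) (arr1 : List Int) (arr2 : List Int), Dom_solutionA n arr1 arr2 → Pre_solutionA n arr1 arr2 → Spec_solutionA n arr1 arr2 (solutionA n arr1 arr2)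

-- ===== LEMMAS AND PROOFS =====

-- the MSB-first n-bit string of m
def bits (k m : Nat) : List Char := (List.range k).map (fun j => if m.testBit (k-1-j) then '1' else '0')

lemma bits_zero (k : Nat) : bits k 0 = List.replicate k '0' := by
  simp [bits, Nat.zero_testBit, List.map_const']

lemma bits_succ (k m : Nat) :
    bits (k+1) m = bits k (m/2) ++ [if m % 2 = 1 then '1' else '0'] := by
  unfold bits
  rw [List.range_succ, List.map_append]
  congr 1
  · apply List.map_congr_left
    intro j hj
    have hjk : j < k := List.mem_range.mp hj
    have h1 : k + 1 - 1 - j = (k - 1 - j) + 1 := by omega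
    rw [h1, Nat.testBit_succ]
  · simp only [List.map_cons, List.map_nil]
    rw [show k + 1 - 1 - k = 0 from by omega, Nat.testBit_zero]
    simp

lemma binNat_pos (m : Nat) (hm : 0 < m) :
    binNat m = binNat (m/2) ++ [if m % 2 = 1 then '1' else '0'] := by
  cases m with
  | zero => omega
  | succ m => rw [binNat]

lemma binpad (k m : Nat) (hk : 1 ≤ k) (hm : m < 2 ^ k) :
    List.replicate (k - (binChars m).length) '0' ++ binChars m = bits k m := by
  induction k generalizing m with
  | zero => omega
  | succ k ih =>
    by_cases hm1 : m ≤ 1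
    · have hb : binChars m = [if m % 2 = 1 then '1' else '0'] := by
        interval_cases m <;> simp [binChars, binNat]
      have hd : m / 2 = 0 := by omega
      rw [bits_succ, hd, bits_zero, hb]
      simp
    · have hm2 : 2 ≤ m := by omega
      have hk1 : 1 ≤ k := by
        by_contra h
        have : k = 0 := by omega
        subst this
        simp at hm; omega
      have hdm : m / 2 < 2 ^ k := by
        have : m < 2 ^ k * 2 := by rw [← pow_succ]; exact hm
        omega
      have hdp : 0 < m / 2 := by omega
      have hbc : binChars m = binNat (m/2) ++ [if m % 2 = 1 then '1' else '0'] := by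
        rw [binChars, if_neg (by omega)]
        exact binNat_pos m (by omega)
      have hbc' : binChars (m/2) = binNat (m/2) := by
        rw [binChars, if_neg (by omega)]
      have ihm := ih (m/2) hk1 hdm
      rw [hbc'] at ihm
      rw [bits_succ, ← ihm, hbc]
      rw [List.length_append, List.length_singleton]
      have harith : k + 1 - ((binNat (m/2)).length + 1) = k - (binNat (m/2)).length := by omega
      rw [harith, List.append_assoc]

lemma pad_eq (k : Nat) : ∀ (j : Nat) (fuel : Nat) (a : List Char),
    a.length + j = k → j ≤ fuel → padA k fuel a = List.replicate j '0' ++ a := by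
  intro j
  induction j with
  | zero =>
    intro fuel a hlen _
    cases fuel with
    | zero => simp [padA]
    | succ f => rw [padA, if_pos (by omega)]; simp
  | succ j ih =>
    intro fuel a hlen hf
    cases fuel with
    | zero => omega
    | succ f =>
      rw [padA, if_neg (by omega)]
      rw [ih f ('0' :: a) (by simp; omega) (by omega)]
      rw [List.replicate_succ']
      simp

lemma binChars_len_le (k m : Nat) (hk : 1 ≤ k) (hm : m < 2 ^ k) :
    (binChars m).length ≤ k := by
  have h := congrArg List.length (binpad k m hk hm)
  simp [bits] at h
  omega

lemma pad_bits (k m : Nat) (hk : 1 ≤ k) (hm : m < 2 ^ k) :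
    padA k k (binChars m) = bits k m := by
  have hle := binChars_len_le k m hk hm
  rw [pad_eq k (k - (binChars m).length) k (binChars m) (by omega) (by omega)]
  rw [binpad k m hk hm]

lemma bits_getD (k m i : Nat) (hi : i < k) :
    (bits k m).getD i '0' = if m.testBit (k-1-i) then '1' else '0' := by
  simp [bits, List.getD, hi]

lemma foldl_app {α β : Type} (f : α → β) (l : List α) (init : List β) :
    l.foldl (fun acc x => acc ++ [f x]) init = init ++ l.map f := by
  induction l generalizing init with
  | nil => simp
  | cons x xs ih => simp [List.foldl, ih]

-- ===== VERDICT (by name: the statement is the Claim_ definition above) =====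
theorem solutionA_spec : Claim_equal_solutionA := by
  intro n arr1 arr2 _ hpre
  unfold Spec_solutionA solutionA solutionA_alt
  rw [foldl_app]
  rw [List.nil_append]
  obtain ⟨hn, hall⟩ := hpre
  apply List.map_congr_left
  intro p hp
  have hn1 : 1 ≤ n := by
    rcases hn with h | h
    · rw [h] at hp; simp at hp
    · exact h
  have hk : 1 ≤ n.toNat := by omega
  obtain ⟨h1, h2, h3, h4⟩ := hall p hp
  have hm1 : p.1.toNat < 2 ^ n.toNat := by
    have := Int.toNat_of_nonneg h1
    have h2' : (p.1.toNat : Int) < ((2 ^ n.toNat : Nat) : Int) := by push_cast; omega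
    exact_mod_cast h2'
  have hm2 : p.2.toNat < 2 ^ n.toNat := by
    have := Int.toNat_of_nonneg h3
    have h4' : (p.2.toNat : Int) < ((2 ^ n.toNat : Nat) : Int) := by push_cast; omega
    exact_mod_cast h4'
  congr 1
  rw [pad_bits n.toNat p.1.toNat hk hm1, pad_bits n.toNat p.2.toNat hk hm2]
  apply List.map_congr_left
  intro i hi
  have hik : i < n.toNat := List.mem_range.mp hi
  rw [bits_getD _ _ _ hik, bits_getD _ _ _ hik, Nat.testBit_or]
  cases hb1 : p.1.toNat.testBit (n.toNat - 1 - i) <;>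
    cases hb2 : p.2.toNat.testBit (n.toNat - 1 - i) <;> simp_all
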